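-- pv_equiv track=rewrite | github.com/lxylxy123456/AdventOfCode2024 | d13/s.py | get_refl_col
-- ===== SOURCE A (Python) =====
-- import argparse, math, sys, re, functools, operator, itertools
--
-- def get_refl_row(matrix):
-- 	for i in range(1, len(matrix)):
-- 		a = matrix[i:]
-- 		b = matrix[i - 1:: -1]
-- 		if all(map(operator.eq, a, b)):
-- 			yield i
--
-- def get_refl_col(matrix):
-- 	transpose = []
-- 	for i in range(len(matrix[0])):
-- 		s = ''
-- 		for j in range(len(matrix)):
-- 			s += matrix[j][i]
-- 		transpose.append(''.join(s))
-- 	yield from get_refl_row(transpose)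
-- ===== SOURCE B (Python) =====
-- def get_refl_col(matrix):
-- 	cols = len(matrix[0])
-- 	for i in range(1, cols):
-- 		w = i if i < cols - i else cols - i
-- 		if all(row[i + k] == row[i - 1 - k] for row in matrix for k in range(w)):
-- 			yield i
-- ===== Notes on version B (the rewrite author's own statement) =====
-- stated objective: faster
-- what changed: B drops A's transpose construction and slice/reverse list comparisons: for each candidate axis it checks the mirrored characters directly in each row with early exit, building no intermediate lists.
import Mathlib
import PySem

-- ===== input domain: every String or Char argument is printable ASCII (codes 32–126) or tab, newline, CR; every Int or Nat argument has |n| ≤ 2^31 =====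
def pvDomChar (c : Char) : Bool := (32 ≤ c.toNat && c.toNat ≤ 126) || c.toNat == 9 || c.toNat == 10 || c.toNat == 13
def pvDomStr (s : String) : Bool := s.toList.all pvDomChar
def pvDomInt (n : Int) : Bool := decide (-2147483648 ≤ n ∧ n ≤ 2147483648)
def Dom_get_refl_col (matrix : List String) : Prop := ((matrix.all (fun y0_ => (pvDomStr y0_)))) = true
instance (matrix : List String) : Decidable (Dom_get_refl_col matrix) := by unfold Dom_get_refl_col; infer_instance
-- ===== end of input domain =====

-- B replaces A's transpose-then-slice-and-reverse scan by a direct per-row mirrored-character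
-- check at each candidate axis (no transposed grid is built); objective: faster (constant factor).

-- ===== PORT A =====
-- helper = A's get_refl_row, applied to the transposed grid (columns as List Char)
def pv_get_refl_row (matrix : List (List Char)) : List Int :=
  (PySem.List.pyRange 1 (matrix.length : Int) 1).foldl (fun out i =>
    if ((PySem.List.slice matrix (some i) none).zip
        ((PySem.List.slice? matrix (some (i - 1)) none (-1)).getD [])).all (fun p => p.1 == p.2)
    then out ++ [i] else out) []

def get_refl_col (matrix : List String) : List Int :=
  let transpose : List (List Char) :=
    (PySem.List.pyRange 0 (PySem.Str.len ((PySem.List.pyGet? matrix 0).getD "")) 1).foldl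
      (fun tp i =>
        tp ++ [ (PySem.List.pyRange 0 (matrix.length : Int) 1).foldl
                  (fun s j => s ++ [ ((PySem.List.pyGet? matrix j).bind
                                       (fun row => PySem.Str.pyGet? row i)).getD ' ' ]) [] ])
      []
  pv_get_refl_row transpose

-- ===== PORT B =====
def get_refl_col_alt (matrix : List String) : List Int :=
  let cols : Int := PySem.Str.len ((PySem.List.pyGet? matrix 0).getD "")
  (PySem.List.pyRange 1 cols 1).foldl (fun out i =>
    if matrix.all (fun row =>
        (PySem.List.pyRange 0 (if i < cols - i then i else cols - i) 1).all (fun k =>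
          (PySem.Str.pyGet? row (i + k)).getD ' ' == (PySem.Str.pyGet? row (i - 1 - k)).getD ' '))
    then out ++ [i] else out) []

-- ===== PRECONDITION & SPEC =====
-- Pre_ excludes exactly the inputs where Python A raises IndexError: the empty matrix
-- (matrix[0]) and matrices with a row shorter than the first row (matrix[j][i]).
def Pre_get_refl_col (matrix : List String) : Prop :=
  matrix ≠ [] ∧ ∀ row ∈ matrix, PySem.Str.len (matrix.headD "") ≤ PySem.Str.len row
instance (matrix : List String) : Decidable (Pre_get_refl_col matrix) := by
  unfold Pre_get_refl_col; infer_instance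

def pvWitness_get_refl_col : List String := ["aa", "ba"]

def Spec_get_refl_col (matrix : List String) (out : List Int) : Prop := out = get_refl_col_alt matrix
instance (matrix : List String) (out : List Int) : Decidable (Spec_get_refl_col matrix out) := by
  unfold Spec_get_refl_col; infer_instance

-- ===== CLAIM (what is proved, stated in full; the proofs are below) =====
def Claim_equal_get_refl_col : Prop := ∀ (matrix : List String), Dom_get_refl_col matrix → Pre_get_refl_col matrix → Spec_get_refl_col matrix (get_refl_col matrix)

-- ===== LEMMAS AND PROOFS =====

-- the character A's transpose stores for row `row`, column c (the one B compares in place)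
def pvChar (row : String) (c : Nat) : Char := (row.toList[c]?).getD ' '
-- column c of the grid, as A's transpose materialises it
def pvCol (matrix : List String) (c : Nat) : List Char := matrix.map (fun row => pvChar row c)

lemma map_range_opt {α β : Type} (l : List α) (G : Option α → β) :
    (List.range l.length).map (fun k => G l[k]?) = l.map (fun x => G (some x)) := by
  apply List.ext_getElem <;> simp
  intro i h _; rw [List.getElem?_eq_getElem h]

lemma zip_range_range (a b : Nat) :
    (List.range a).zip (List.range b) = (List.range (min a b)).map (fun k => (k, k)) := by
  apply List.ext_getElem <;> simp [List.getElem_zip]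

-- xs[i-1::-1] is the reversed i-element prefix (1 ≤ i ≤ len xs)
lemma slice?_rev {α : Type} [Inhabited α] (xs : List α) (i : Int) (h1 : 1 ≤ i)
    (h2 : i ≤ (xs.length : Int)) :
    PySem.List.slice? xs (some (i - 1)) none (-1) = some ((xs.take i.toNat).reverse) := by
  unfold PySem.List.slice? PySem.List.sliceIndices
  have hne : (-1 : Int) ≠ 0 := by norm_num
  simp only [if_neg hne]
  norm_num
  have hs : min (i - 1) (↑xs.length - 1) = i - 1 := by omega
  rw [hs]
  rw [if_neg (by omega : ¬ i < 1), if_pos (by omega : (-1 : Int) < i - 1)]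
  have hit : (i - 1 + 1).toNat = i.toNat := by omega
  rw [hit]
  rw [List.filterMap_congr (g := fun x => some (xs.getD (i.toNat - 1 - x) default)) ?_]
  · rw [show (fun x => some (xs.getD (i.toNat - 1 - x) default)) =
        some ∘ (fun x => xs.getD (i.toNat - 1 - x) default) from rfl, List.filterMap_eq_map]
    apply List.ext_getElem
    · simp; omega
    · intro p hp hp'
      have hlen : (List.take i.toNat xs).length = i.toNat := by simp; omega
      simp only [List.getElem_map, List.getElem_range, List.getElem_reverse, List.getElem_take]
      rw [List.getD_eq_getElem xs default (by omega)]
      congr 1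
      simp only [hlen]
  · intro x hx
    simp only [List.mem_range] at hx
    have hidx : (i - 1 + -↑x).toNat = i.toNat - 1 - x := by omega
    show xs[(i - 1 + -(x:Int)).toNat]? = some (xs.getD (i.toNat - 1 - x) default)
    rw [hidx, List.getElem?_eq_getElem (by omega), List.getD_eq_getElem xs default (by omega)]

-- A's transpose loop builds exactly the list of columns
lemma transpose_eq (matrix : List String) :
    (PySem.List.pyRange 0 ((((PySem.List.pyGet? matrix 0).getD "").toList.length : Nat) : Int) 1).foldl
      (fun tp i =>
        tp ++ [ (PySem.List.pyRange 0 (matrix.length : Int) 1).foldl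
                  (fun s j => s ++ [ ((PySem.List.pyGet? matrix j).bind
                                       (fun row => PySem.Str.pyGet? row i)).getD ' ' ]) [] ])
      []
    = (List.range ((PySem.List.pyGet? matrix 0).getD "").toList.length).map (pvCol matrix) := by
  rw [PySem.List.foldl_append_singleton_eq_map]
  simp only [List.nil_append, PySem.List.pyRange_one, List.map_map,
    Int.sub_zero, Int.toNat_natCast]
  apply List.map_congr_left
  intro c hc
  simp only [Function.comp_apply, zero_add]
  rw [PySem.List.foldl_append_singleton_eq_map]
  simp only [List.nil_append, List.map_map, Function.comp_def, PySem.List.pyGet?_natCast]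
  rw [map_range_opt matrix (fun o => (o.bind (fun row => PySem.Str.pyGet? row (c:Int))).getD ' ')]
  simp [pvCol, pvChar]

-- at axis i (1 ≤ i < C): A's column-slice comparison equals B's per-row mirror check
lemma pred_eq (matrix : List String) (C : Nat) (i : Int) (h1 : 1 ≤ i) (h2 : i < (C:Int)) :
    (((PySem.List.slice ((List.range C).map (pvCol matrix)) (some i) none).zip
      ((PySem.List.slice? ((List.range C).map (pvCol matrix)) (some (i-1)) none (-1)).getD [])).all
        (fun p => p.1 == p.2))
    = matrix.all (fun row =>
        (PySem.List.pyRange 0 (if i < (C:Int) - i then i else (C:Int) - i) 1).all (fun k =>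
          (PySem.Str.pyGet? row (i + k)).getD ' ' == (PySem.Str.pyGet? row (i - 1 - k)).getD ' ')) := by
  have hit : i = (i.toNat : Int) := by omega
  set it := i.toNat with hdef
  have hit1 : 1 ≤ it := by omega
  have hitC : it < C := by omega
  rw [PySem.List.slice_from _ (by omega : (0:Int) ≤ i)]
  rw [slice?_rev _ i (by omega) (by simp; omega)]
  simp only [Option.getD_some]
  have hsplit : List.range C = List.range it ++ (List.range (C - it)).map (it + ·) := by
    rw [← List.range_add]; congr 1; omega
  have ha : (List.map (pvCol matrix) (List.range C)).drop it
      = (List.range (C - it)).map (fun p => pvCol matrix (it + p)) := by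
    conv_lhs => rw [hsplit, List.map_append]
    rw [List.drop_left' (by simp), List.map_map]
    rfl
  have hb : ((List.map (pvCol matrix) (List.range C)).take it).reverse
      = (List.range it).map (fun p => pvCol matrix (it - 1 - p)) := by
    rw [← List.map_take, List.take_range, show min it C = it by omega, ← List.map_reverse,
      List.range_eq_range', List.reverse_range', List.map_map]
    simp only [Function.comp_def, Nat.zero_add]
    rw [← List.range_eq_range']
  rw [ha, hb, List.zip_map, zip_range_range, List.map_map, List.all_map]
  have hw : ((if i < (C:Int) - i then i else (C:Int) - i) - 0).toNat = min (C - it) it := by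
    split_ifs <;> omega
  rw [PySem.List.pyRange_one]
  rw [Bool.eq_iff_iff]
  simp only [List.all_eq_true, List.all_map, List.mem_range, Function.comp_apply, Prod.map_apply,
    beq_iff_eq, pvCol, List.map_inj_left, hw]
  constructor
  · intro h row hrow k hk
    have e1 : i + (0 + (k:Int)) = ((it + k : Nat) : Int) := by omega
    have e2 : i - 1 - (0 + (k:Int)) = ((it - 1 - k : Nat) : Int) := by omega
    rw [e1, e2, PySem.Str.pyGet?_natCast, PySem.Str.pyGet?_natCast]
    exact h k hk row hrow
  · intro h k hk row hrow
    have e1 : i + (0 + (k:Int)) = ((it + k : Nat) : Int) := by omega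
    have e2 : i - 1 - (0 + (k:Int)) = ((it - 1 - k : Nat) : Int) := by omega
    have := h row hrow k hk
    rw [e1, e2, PySem.Str.pyGet?_natCast, PySem.Str.pyGet?_natCast] at this
    exact this

-- ===== VERDICT (by name: the statement is the Claim_ definition above) =====
theorem get_refl_col_spec : Claim_equal_get_refl_col := by
  intro matrix _ _
  unfold Spec_get_refl_col
  simp only [get_refl_col, get_refl_col_alt, pv_get_refl_row, PySem.Str.len_eq]
  simp only [transpose_eq]
  simp only [List.length_map, List.length_range]
  rw [PySem.List.foldl_append_if, PySem.List.foldl_append_if]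
  simp only [List.nil_append, List.map_id']
  apply List.filter_congr
  intro i hi
  rw [PySem.List.mem_pyRange_one] at hi
  exact pred_eq matrix _ i hi.1 hi.2
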